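-- pv_equiv track=rewrite | github.com/nulijiazaizhong/Discord-sync-to-kook | translator.py | _split_text_and_code_blocks
-- ===== SOURCE A (Python) =====
-- def _split_text_and_code_blocks(text: str):
--     """将文本分割为普通文本和代码块
--
--     Args:
--         text: 要分割的文本
--
--     Returns:
--         list: 包含文本片段和类型的列表，类型为"text"或"code"
--     """
--     parts = []
--     is_in_code_block = False
--     current_part = ""
--
--     # 按行分割文本
--     lines = text.split('\n')
--
--     for line in lines:
--         # 检查是否是代码块开始或结束标记
--         if line.strip().startswith("```") or line.strip() == "```":
--             # 保存当前部分
--             if current_part: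
--                 parts.append({
--                     "type": "code" if is_in_code_block else "text",
--                     "content": current_part
--                 })
--                 current_part = ""
--
--             # 切换代码块状态
--             is_in_code_block = not is_in_code_block
--
--             # 添加当前行（代码块标记）
--             current_part += line + "\n"
--         else:
--             # 添加普通行
--             current_part += line + "\n"
--
--     # 添加最后一部分
--     if current_part:
--         parts.append({
--             "type": "code" if is_in_code_block else "text",
--             "content": current_part
--         })
--
--     return parts
-- ===== SOURCE B (Python) =====
-- def _split_text_and_code_blocks(text: str):
--     """Split text into plain-text and code-block segments (fence-boundary slicing
--     with alternating types, instead of an accumulating toggle loop)."""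
--     lines = text.split('\n')
--
--     def _is_fence(line):
--         return line.strip().startswith("```")
--
--     def _segments(ls):
--         # cut the line list into maximal chunks, each later chunk starting at a fence line
--         segs = []
--         while ls:
--             head, rest = ls[0], ls[1:]
--             i = 0
--             while i < len(rest) and not _is_fence(rest[i]):
--                 i += 1
--             segs.append([head] + rest[:i])
--             ls = rest[i:]
--         return segs
--
--     parts = []
--     typ = "code" if _is_fence(lines[0]) else "text"
--     for seg in _segments(lines):
--         parts.append({"type": typ, "content": "\n".join(seg) + "\n"})
--         typ = "text" if typ == "code" else "code"
--     return parts
-- ===== Notes on version B (the rewrite author's own statement) =====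
-- stated objective: alternative
-- what changed: Replaces A's single accumulating toggle-state loop by a two-phase decomposition: cut the line list into fence-bounded segments first, then emit one part per segment with alternating text/code types.
import Mathlib
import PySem

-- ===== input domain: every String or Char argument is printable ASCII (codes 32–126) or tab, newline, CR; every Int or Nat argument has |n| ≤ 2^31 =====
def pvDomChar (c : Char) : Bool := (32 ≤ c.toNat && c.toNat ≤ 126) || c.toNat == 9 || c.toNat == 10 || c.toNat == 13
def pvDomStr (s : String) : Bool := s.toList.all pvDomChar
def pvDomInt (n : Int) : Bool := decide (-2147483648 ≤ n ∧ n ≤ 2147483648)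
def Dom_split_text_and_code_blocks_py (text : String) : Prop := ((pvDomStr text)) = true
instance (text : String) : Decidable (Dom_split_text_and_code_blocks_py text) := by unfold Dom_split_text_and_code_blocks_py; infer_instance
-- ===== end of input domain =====

-- B replaces A's accumulating toggle loop by fence-boundary segmentation with alternating
-- segment types (alternative decomposition; same cost).


-- ===== PORT A =====
-- strings are handled on the List Char side (PySem.Chars), exact per PYSEM.md

-- line.strip().startswith("```") or line.strip() == "```"
def pvFenceA (line : List Char) : Bool :=
  PySem.Chars.startswith (PySem.Chars.strip line) "```".toList
    || PySem.Chars.strip line == "```".toList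

-- {"type": "code" if is_in_code_block else "text", "content": current_part}
def pvPartA (isIn : Bool) (cur : List Char) : List (String × String) :=
  [("type", if isIn then "code" else "text"), ("content", String.ofList cur)]

-- one iteration of A's for-loop; state = (parts, is_in_code_block, current_part)
def pvStepA (st : List (List (String × String)) × Bool × List Char) (line : List Char) :
    List (List (String × String)) × Bool × List Char :=
  if pvFenceA line then
    ((if st.2.2 ≠ [] then st.1 ++ [pvPartA st.2.1 st.2.2] else st.1), !st.2.1, line ++ ['\n'])
  else
    (st.1, st.2.1, st.2.2 ++ line ++ ['\n'])

-- the trailing "if current_part: parts.append(...)"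
def pvFinishA (st : List (List (String × String)) × Bool × List Char) :
    List (List (String × String)) :=
  if st.2.2 ≠ [] then st.1 ++ [pvPartA st.2.1 st.2.2] else st.1

def split_text_and_code_blocks_py (text : String) : List (List (String × String)) :=
  let lines := PySem.Chars.splitOn text.toList ['\n']   -- text.split('\n')
  pvFinishA (lines.foldl pvStepA ([], false, []))

-- ===== PORT B =====
def pvFenceB (line : List Char) : Bool :=
  PySem.Chars.startswith (PySem.Chars.strip line) "```".toList

-- _segments: cut the line list into chunks, each later chunk starting at a fence line
def pvSegmentsB (ls : List (List Char)) : List (List (List Char)) :=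
  match ls with
  | [] => []
  | head :: rest =>
      (head :: rest.takeWhile (fun l => !pvFenceB l)) ::
        pvSegmentsB (rest.dropWhile (fun l => !pvFenceB l))
termination_by ls.length
decreasing_by
  simp only [List.length_cons]
  exact Nat.lt_succ_of_le (List.length_dropWhile_le _ _)

-- the emitting for-loop: one part per segment, types alternating
def pvEmitB (typ : String) (segs : List (List (List Char))) : List (List (String × String)) :=
  match segs with
  | [] => []
  | seg :: rest =>
      [("type", typ), ("content", String.ofList (PySem.Chars.join ['\n'] seg ++ ['\n']))] ::
        pvEmitB (if typ == "code" then "text" else "code") rest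

def split_text_and_code_blocks_py_alt (text : String) : List (List (String × String)) :=
  let lines := PySem.Chars.splitOn text.toList ['\n']   -- text.split('\n')
  pvEmitB (if pvFenceB (lines.headD []) then "code" else "text") (pvSegmentsB lines)

-- ===== PRECONDITION & SPEC =====
def Spec_split_text_and_code_blocks_py (text : String) (out : List (List (String × String))) : Prop := out = split_text_and_code_blocks_py_alt text
instance (text : String) (out : List (List (String × String))) : Decidable (Spec_split_text_and_code_blocks_py text out) := by unfold Spec_split_text_and_code_blocks_py; infer_instance

-- ===== CLAIM (what is proved, stated in full; the proofs are below) =====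
def Claim_equal_split_text_and_code_blocks_py : Prop := ∀ (text : String), Dom_split_text_and_code_blocks_py text → Spec_split_text_and_code_blocks_py text (split_text_and_code_blocks_py text)

-- ===== LEMMAS AND PROOFS =====

-- A's two fence tests are one: equality with "```" already implies startswith "```"
theorem pvFenceA_eq (line : List Char) : pvFenceA line = pvFenceB line := by
  unfold pvFenceA pvFenceB
  cases hs : PySem.Chars.startswith (PySem.Chars.strip line) "```".toList
  · cases he : (PySem.Chars.strip line == "```".toList)
    · rfl
    · exfalso
      have : PySem.Chars.strip line = "```".toList := by exact_mod_cast beq_iff_eq.mp he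
      rw [this, (PySem.Chars.startswith_iff _ _).mpr (List.prefix_refl _)] at hs
      simp at hs
  · rfl

-- concatenation of line + "\n" over a list of lines
def pvCat (ls : List (List Char)) : List Char := (ls.map (fun l => l ++ ['\n'])).flatten

-- what A's loop still produces after the first line of each remaining segment is buffered:
-- pvGRest isIn ls = the parts for the segments starting at the fence lines of ls
def pvGRest (isIn : Bool) (ls : List (List Char)) : List (List (String × String)) :=
  match ls with
  | [] => []
  | a :: t =>
      pvPartA isIn (a ++ ['\n'] ++ pvCat (t.takeWhile (fun l => !pvFenceB l))) ::
        pvGRest (!isIn) (t.dropWhile (fun l => !pvFenceB l))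
termination_by ls.length
decreasing_by
  simp only [List.length_cons]
  exact Nat.lt_succ_of_le (List.length_dropWhile_le _ _)

-- what A's loop + final flush produce from state (isIn, cur ≠ []) on remaining lines ls
def pvGloop (isIn : Bool) (cur : List Char) (ls : List (List Char)) :
    List (List (String × String)) :=
  pvPartA isIn (cur ++ pvCat (ls.takeWhile (fun l => !pvFenceB l))) ::
    pvGRest (!isIn) (ls.dropWhile (fun l => !pvFenceB l))

theorem pvGloop_nonfence (isIn : Bool) (cur h : List Char) (t : List (List Char))
    (hf : pvFenceB h = false) :
    pvGloop isIn cur (h :: t) = pvGloop isIn (cur ++ h ++ ['\n']) t := by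
  simp [pvGloop, hf, pvCat]

theorem pvGloop_fence (isIn : Bool) (cur h : List Char) (t : List (List Char))
    (hf : pvFenceB h = true) :
    pvGloop isIn cur (h :: t) = pvPartA isIn cur :: pvGloop (!isIn) (h ++ ['\n']) t := by
  rw [pvGloop, pvGloop]
  simp only [List.takeWhile_cons, List.dropWhile_cons, hf, Bool.not_true]
  rw [pvGRest.eq_def]
  simp [pvCat]

-- A's loop + final flush computes pvGloop, given a nonempty current part
theorem pvMain (ls : List (List Char)) : ∀ (parts : List (List (String × String)))
    (isIn : Bool) (cur : List Char), cur ≠ [] →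
    pvFinishA (ls.foldl pvStepA (parts, isIn, cur)) = parts ++ pvGloop isIn cur ls := by
  induction ls with
  | nil =>
      intro parts isIn cur hcur
      simp [pvFinishA, hcur, pvGloop, pvGRest, pvCat]
  | cons h t ih =>
      intro parts isIn cur hcur
      rw [List.foldl_cons]
      cases hf : pvFenceB h
      · have hstep : pvStepA (parts, isIn, cur) h = (parts, isIn, cur ++ h ++ ['\n']) := by
          simp [pvStepA, pvFenceA_eq, hf]
        rw [hstep, ih parts isIn _ (by simp), pvGloop_nonfence isIn cur h t hf]
      · have hstep : pvStepA (parts, isIn, cur) h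
            = (parts ++ [pvPartA isIn cur], !isIn, h ++ ['\n']) := by
          simp [pvStepA, pvFenceA_eq, hf, hcur]
        rw [hstep, ih _ (!isIn) _ (by simp), pvGloop_fence isIn cur h t hf]
        simp

-- "\n".join(seg) + "\n"  is the concatenation of  line + "\n"  over the segment
theorem pvJoin_lines (tw : List (List Char)) : ∀ h : List Char,
    PySem.Chars.join ['\n'] (h :: tw) ++ ['\n'] = h ++ ['\n'] ++ pvCat tw := by
  induction tw with
  | nil => intro h; simp [PySem.Chars.join_singleton, pvCat]
  | cons p ps ih =>
      intro h
      rw [PySem.Chars.join_cons_cons]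
      have := ih p
      simp only [pvCat, List.map_cons, List.flatten_cons] at *
      simp [List.append_assoc] at this ⊢
      rw [this]

-- B's string toggle is the boolean toggle
theorem pvToggle (isIn : Bool) :
    (if ((if isIn then "code" else "text") == "code") = true then "text" else "code")
      = (if !isIn then "code" else "text") := by
  cases isIn <;> rfl

-- the tail parts A still produces are B's emit over the remaining segments
theorem pvGRest_emit (isIn : Bool) (ls : List (List Char)) :
    pvGRest isIn ls = pvEmitB (if isIn then "code" else "text") (pvSegmentsB ls) := by
  induction isIn, ls using pvGRest.induct with
  | case1 isIn => rw [pvGRest, pvSegmentsB, pvEmitB]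
  | case2 isIn a t ih =>
      rw [pvGRest, pvSegmentsB, pvEmitB, ih, pvToggle, pvPartA]
      simp [pvJoin_lines, List.append_assoc]

-- pvGloop from a freshly started segment is B's emit over B's segments
theorem pvGloop_emit (isIn : Bool) (h : List Char) (ls : List (List Char)) :
    pvGloop isIn (h ++ ['\n']) ls
      = pvEmitB (if isIn then "code" else "text") (pvSegmentsB (h :: ls)) := by
  rw [pvGloop, pvSegmentsB, pvEmitB, pvGRest_emit, pvToggle, pvPartA]
  simp [pvJoin_lines, List.append_assoc]

-- ===== VERDICT (by name: the statement is the Claim_ definition above) =====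
theorem split_text_and_code_blocks_py_spec : Claim_equal_split_text_and_code_blocks_py := by
  intro text _
  unfold Spec_split_text_and_code_blocks_py split_text_and_code_blocks_py
    split_text_and_code_blocks_py_alt
  cases hl : PySem.Chars.splitOn text.toList ['\n'] with
  | nil => simp [pvFinishA, pvSegmentsB, pvEmitB]
  | cons h t =>
      simp only [List.foldl_cons, List.headD_cons]
      rcases Bool.eq_false_or_eq_true (pvFenceB h) with hf | hf
      · have hstep : pvStepA ([], false, []) h = ([], true, h ++ ['\n']) := by
          simp [pvStepA, pvFenceA_eq, hf]
        rw [hstep, pvMain t [] true _ (by simp), pvGloop_emit true h t]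
        simp [hf]
      · have hstep : pvStepA ([], false, []) h = ([], false, h ++ ['\n']) := by
          simp [pvStepA, pvFenceA_eq, hf]
        rw [hstep, pvMain t [] false _ (by simp), pvGloop_emit false h t]
        simp [hf]
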